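-- pv_equiv track=rewrite | github.com/overkillkulture/toasted-ai | MaatAI_GODCODE/borg_assimilation/knowledge_crawler/code_bullet/algorithm_library.py | _get_well_depth
-- ===== SOURCE A (Python) =====
-- def _get_well_depth(heights) -> int:
--     max_height = max(heights) if heights else 0
--     if max_height == 0:
--         return 0
--     lower_heights = [heights[i] for i in range(len(heights)) if heights[i] < max_height]
--     if not lower_heights:
--         return 0
--     return max(0, max_height - min(lower_heights) - 1)
-- ===== SOURCE B (Python) =====
-- def _get_well_depth(heights) -> int:
--     if not heights:
--         return 0
--     ordered = sorted(heights)
--     max_height = ordered[-1]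
--     if max_height == 0:
--         return 0
--     min_height = ordered[0]
--     if min_height == max_height:
--         return 0
--     return max(0, max_height - min_height - 1)
-- ===== Notes on version B (the rewrite author's own statement) =====
-- stated objective: alternative
-- what changed: B sorts the list once and reads the extremes off the sorted list (last = max, first = min), instead of A's max-scan, index-filtered list build, and min-scan over the filtered list; it relies on min(elements below max) = global min whenever min < max.
import Mathlib
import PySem

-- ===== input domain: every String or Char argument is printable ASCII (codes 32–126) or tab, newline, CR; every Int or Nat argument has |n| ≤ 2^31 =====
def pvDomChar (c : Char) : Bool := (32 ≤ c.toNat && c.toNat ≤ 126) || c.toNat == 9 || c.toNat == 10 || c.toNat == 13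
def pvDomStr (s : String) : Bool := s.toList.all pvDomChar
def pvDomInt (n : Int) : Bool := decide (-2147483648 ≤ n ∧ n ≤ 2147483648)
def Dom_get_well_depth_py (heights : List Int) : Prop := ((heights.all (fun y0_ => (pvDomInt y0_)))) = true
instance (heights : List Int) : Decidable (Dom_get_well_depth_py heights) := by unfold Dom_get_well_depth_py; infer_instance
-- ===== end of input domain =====

-- B sorts the list once and reads min/max off the sorted list's ends, replacing A's max-scan +
-- filtered-list build + min-scan; same results, a different (sort-based) algorithm, no speed claim.

-- ===== PORT A =====
def get_well_depth_py (heights : List Int) : Int :=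
  let max_height : Int := if heights.isEmpty then 0 else (PySem.List.max? heights (fun x => x)).getD 0
  if max_height = 0 then 0
  else
    -- [heights[i] for i in range(len(heights)) if heights[i] < max_height] — index comprehension over
    -- range(len(heights)), i.e. the elements below max_height in order
    let lower_heights := heights.filter (fun h => decide (h < max_height))
    if lower_heights.isEmpty then 0
    else max 0 (max_height - (PySem.List.min? lower_heights (fun x => x)).getD 0 - 1)

-- ===== PORT B =====
def get_well_depth_py_alt (heights : List Int) : Int :=
  if heights.isEmpty then 0
  else
    let ordered := PySem.List.sorted heights (fun x => x) false
    let max_height := (PySem.List.pyGet? ordered (-1)).getD 0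
    if max_height = 0 then 0
    else
      let min_height := (PySem.List.pyGet? ordered 0).getD 0
      if min_height = max_height then 0
      else max 0 (max_height - min_height - 1)

-- ===== PRECONDITION & SPEC =====
def Spec_get_well_depth_py (heights : List Int) (out : Int) : Prop := out = get_well_depth_py_alt heights
instance (heights : List Int) (out : Int) : Decidable (Spec_get_well_depth_py heights out) := by unfold Spec_get_well_depth_py; infer_instance

-- ===== CLAIM (what is proved, stated in full; the proofs are below) =====
def Claim_equal_get_well_depth_py : Prop := ∀ (heights : List Int), Dom_get_well_depth_py heights → Spec_get_well_depth_py heights (get_well_depth_py heights)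

-- ===== LEMMAS AND PROOFS =====

-- every element of a nonempty sorted list is ≤ its last element
theorem last_sorted_ge (xs : List Int) {L : Int}
    (hL : (PySem.List.sorted xs (fun x => x) false).getLast? = some L) :
    ∀ y ∈ xs, y ≤ L := by
  intro y hy
  have hy' : y ∈ PySem.List.sorted xs (fun x => x) false :=
    ((PySem.List.sorted_perm xs (fun x => x) false).mem_iff).2 hy
  obtain ⟨i, hi, hgi⟩ := List.getElem_of_mem hy'
  have hne : PySem.List.sorted xs (fun x => x) false ≠ [] := by
    intro h; rw [h] at hL; simp at hL
  have hlen : 0 < (PySem.List.sorted xs (fun x => x) false).length :=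
    List.length_pos_iff.2 hne
  rw [List.getLast?_eq_getElem?,
    List.getElem?_eq_getElem (by omega : (PySem.List.sorted xs (fun x => x) false).length - 1 < (PySem.List.sorted xs (fun x => x) false).length)] at hL
  have hLval : (PySem.List.sorted xs (fun x => x) false)[(PySem.List.sorted xs (fun x => x) false).length - 1] = L :=
    Option.some_injective _ hL
  have hmono := PySem.List.key_sorted_getElem_mono (xs := xs) (key := fun x => x)
    (p := i) (q := (PySem.List.sorted xs (fun x => x) false).length - 1) (by omega) (by omega)
  simp only [PySem.List.length_sorted] at hLval
  simpa [hgi, hLval] using hmono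

-- evaluate A at the global max M and min m
theorem A_eval (heights : List Int) (M m : Int)
    (hM : PySem.List.max? heights (fun x => x) = some M)
    (hm : PySem.List.min? heights (fun x => x) = some m) :
    get_well_depth_py heights =
      if M = 0 then 0 else if m = M then 0 else max 0 (M - m - 1) := by
  have hne : heights.isEmpty = false := by
    cases heights with
    | nil => simp [PySem.List.max?] at hM
    | cons a t => simp
  have hMmem : M ∈ heights := PySem.List.max?_mem hM
  have hmmem : m ∈ heights := PySem.List.min?_mem hm
  have hMmax : ∀ y ∈ heights, y ≤ M := PySem.List.max?_isMax hM
  have hmmin : ∀ y ∈ heights, m ≤ y := PySem.List.min?_isMin hm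
  unfold get_well_depth_py
  simp only [hne, Bool.false_eq_true, if_false, hM, Option.getD_some]
  by_cases h0 : M = 0
  · simp [h0]
  · simp only [h0, if_false]
    by_cases hmM : m = M
    · have hfil : heights.filter (fun h => decide (h < M)) = [] := by
        apply List.filter_eq_nil_iff.2
        intro x hx
        have h1 := hmmin x hx
        have h2 := hMmax x hx
        simp; omega
      simp [hfil, hmM]
    · have hmltM : m < M := lt_of_le_of_ne (hmmin M hMmem) hmM
      have hmem : m ∈ heights.filter (fun h => decide (h < M)) := by
        simp [List.mem_filter, hmmem, hmltM]
      have hfne : (heights.filter (fun h => decide (h < M))).isEmpty = false := by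
        cases hh : heights.filter (fun h => decide (h < M)) with
        | nil => rw [hh] at hmem; simp at hmem
        | cons a t => simp
      simp only [hfne, Bool.false_eq_true, if_false, hmM]
      obtain ⟨m', hm'⟩ : ∃ m', PySem.List.min? (heights.filter (fun h => decide (h < M))) (fun x => x) = some m' := by
        cases hq : PySem.List.min? (heights.filter (fun h => decide (h < M))) (fun x => x) with
        | none =>
          have := (PySem.List.min?_eq_none_iff (xs := heights.filter (fun h => decide (h < M))) (key := fun x => x)).1 hq
          rw [this] at hmem; simp at hmem
        | some v => exact ⟨v, rfl⟩
      have hm'1 : m' ≤ m := PySem.List.min?_isMin hm' m hmem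
      have hm'2 : m ≤ m' := by
        have : m' ∈ heights := (List.mem_filter.1 (PySem.List.min?_mem hm')).1
        exact hmmin m' this
      have : m' = m := le_antisymm hm'1 hm'2
      rw [hm', this]
      simp

-- evaluate B at the global max M and min m
theorem B_eval (heights : List Int) (M m : Int)
    (hM : PySem.List.max? heights (fun x => x) = some M)
    (hm : PySem.List.min? heights (fun x => x) = some m) :
    get_well_depth_py_alt heights =
      if M = 0 then 0 else if m = M then 0 else max 0 (M - m - 1) := by
  have hne : heights ≠ [] := by
    intro h; rw [h] at hM; simp [PySem.List.max?] at hM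
  have hne' : heights.isEmpty = false := by
    cases heights with
    | nil => exact absurd rfl hne
    | cons a t => simp
  have hMmem : M ∈ heights := PySem.List.max?_mem hM
  have hmmem : m ∈ heights := PySem.List.min?_mem hm
  have hMmax : ∀ y ∈ heights, y ≤ M := PySem.List.max?_isMax hM
  have hmmin : ∀ y ∈ heights, m ≤ y := PySem.List.min?_isMin hm
  set os := PySem.List.sorted heights (fun x => x) false with hos
  have hosne : os ≠ [] := by
    intro h; rw [hos] at h
    exact hne ((PySem.List.sorted_eq_nil_iff _ _ _).1 h)
  obtain ⟨h0, t0, hcons⟩ := List.exists_cons_of_ne_nil hosne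
  obtain ⟨L, hL⟩ : ∃ L, os.getLast? = some L := by
    cases hq : os.getLast? with
    | none => exact absurd (List.getLast?_eq_none_iff.1 hq) hosne
    | some v => exact ⟨v, rfl⟩
  have hLmem : L ∈ heights := by
    have : L ∈ os := List.mem_of_getLast? hL
    exact ((PySem.List.sorted_perm heights (fun x => x) false).mem_iff).1 (hos ▸ this)
  have hLM : L = M := le_antisymm (hMmax L hLmem) (last_sorted_ge heights (hos ▸ hL) M hMmem)
  have hh0mem : h0 ∈ heights := by
    have : h0 ∈ os := by rw [hcons]; exact List.mem_cons_self
    exact ((PySem.List.sorted_perm heights (fun x => x) false).mem_iff).1 (hos ▸ this)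
  have hh0m : h0 = m :=
    le_antisymm (PySem.List.key_head_sorted_le heights (fun x => x) (hos ▸ hcons) m hmmem)
      (hmmin h0 hh0mem)
  have hL' : (m :: t0).getLast? = some M := by rw [← hh0m, ← hcons, hL, hLM]
  unfold get_well_depth_py_alt
  rw [← hos]
  simp only [hne', Bool.false_eq_true, if_false, PySem.List.pyGet?_neg_one, hcons, hL',
    Option.getD_some, PySem.List.pyGet?_zero_cons, hh0m]

-- ===== VERDICT (by name: the statement is the Claim_ definition above) =====
theorem get_well_depth_py_spec : Claim_equal_get_well_depth_py := by
  intro heights _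
  unfold Spec_get_well_depth_py
  cases heights with
  | nil => rfl
  | cons a t =>
    obtain ⟨M, hM⟩ : ∃ M, PySem.List.max? (a :: t) (fun x => x) = some M := by
      cases hq : PySem.List.max? (a :: t) (fun x => x) with
      | none => simp [PySem.List.max?_eq_none_iff] at hq
      | some v => exact ⟨v, rfl⟩
    obtain ⟨m, hm⟩ : ∃ m, PySem.List.min? (a :: t) (fun x => x) = some m := by
      cases hq : PySem.List.min? (a :: t) (fun x => x) with
      | none => simp [PySem.List.min?_eq_none_iff] at hq
      | some v => exact ⟨v, rfl⟩
    rw [A_eval _ M m hM hm, B_eval _ M m hM hm]
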